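-- pv_equiv track=rewrite | github.com/Graveside2022/Argos | scripts/audit-function-sizes-v2.py | strip_block_comments
-- ===== SOURCE A (Python) =====
-- from typing import Optional, List, Tuple
--
-- def strip_block_comments(lines: List[str]) -> List[str]:
--     """Remove block comments, preserving line count."""
--     result = []
--     in_bc = False
--     for line in lines:
--         out = []
--         i = 0
--         while i < len(line):
--             if in_bc:
--                 if i + 1 < len(line) and line[i] == '*' and line[i + 1] == '/':
--                     in_bc = False
--                     i += 2
--                     continue
--                 i += 1
--                 continue
--             if i + 1 < len(line) and line[i] == '/' and line[i + 1] == '*':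
--                 in_bc = True
--                 i += 2
--                 continue
--             if i + 1 < len(line) and line[i] == '/' and line[i + 1] == '/':
--                 break
--             out.append(line[i])
--             i += 1
--         result.append(''.join(out))
--     return result
-- ===== SOURCE B (Python) =====
-- def strip_block_comments(lines):
--     """Remove block comments, preserving line count."""
--     result = []
--     in_bc = False
--     for line in lines:
--         pieces = []
--         cur = 0
--         n = len(line)
--         while cur < n:
--             if in_bc:
--                 pos = line.find('*/', cur)
--                 if pos == -1:
--                     cur = n
--                 else:
--                     in_bc = False
--                     cur = pos + 2
--             else:
--                 po = line.find('/*', cur)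
--                 pl = line.find('//', cur)
--                 if po != -1 and (pl == -1 or po < pl):
--                     pieces.append(line[cur:po])
--                     in_bc = True
--                     cur = po + 2
--                 elif pl != -1:
--                     pieces.append(line[cur:pl])
--                     cur = n
--                 else:
--                     pieces.append(line[cur:])
--                     cur = n
--         result.append(''.join(pieces))
--     return result
-- ===== Notes on version B (the rewrite author's own statement) =====
-- stated objective: idiomatic
-- what changed: Replaces A's per-character index loop with str.find-based jumps: the cursor moves directly to the next '/*', '//' or '*/' delimiter and whole slices are appended between delimiters.
import Mathlib
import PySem

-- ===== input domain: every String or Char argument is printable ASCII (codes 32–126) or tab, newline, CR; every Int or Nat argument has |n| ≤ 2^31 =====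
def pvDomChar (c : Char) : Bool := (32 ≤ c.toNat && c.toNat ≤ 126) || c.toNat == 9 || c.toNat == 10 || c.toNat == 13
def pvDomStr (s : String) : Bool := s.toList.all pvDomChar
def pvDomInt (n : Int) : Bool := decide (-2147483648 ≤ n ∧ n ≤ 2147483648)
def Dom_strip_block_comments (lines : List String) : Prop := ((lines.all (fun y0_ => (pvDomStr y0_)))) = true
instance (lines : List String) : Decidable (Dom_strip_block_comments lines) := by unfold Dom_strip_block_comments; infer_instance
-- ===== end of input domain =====

-- B replaces A's per-character scan with str.find-based jumps between comment delimiters,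
-- appending whole slices between them; same return value, the idiomatic Python formulation.

-- ===== PORT A =====
-- A's inner while loop: index i over the line's chars, in_bc state, 'out' accumulator.
def aLoop (cs : List Char) (inbc : Bool) (i : Nat) (out : List Char) : List Char × Bool :=
  if i < cs.length then
    if inbc then
      if i + 1 < cs.length ∧ cs.getD i ' ' = '*' ∧ cs.getD (i+1) ' ' = '/' then
        aLoop cs false (i+2) out
      else
        aLoop cs true (i+1) out
    else if i + 1 < cs.length ∧ cs.getD i ' ' = '/' ∧ cs.getD (i+1) ' ' = '*' then
      aLoop cs true (i+2) out
    else if i + 1 < cs.length ∧ cs.getD i ' ' = '/' ∧ cs.getD (i+1) ' ' = '/' then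
      (out, inbc)  -- break
    else
      aLoop cs inbc (i+1) (out ++ [cs.getD i ' '])
  else (out, inbc)
termination_by cs.length - i
decreasing_by
  · exact Nat.sub_lt_sub_left (by assumption) (Nat.lt_add_of_pos_right (by decide))
  · exact Nat.sub_lt_sub_left (by assumption) (Nat.lt_add_of_pos_right (by decide))
  · exact Nat.sub_lt_sub_left (by assumption) (Nat.lt_add_of_pos_right (by decide))
  · exact Nat.sub_lt_sub_left (by assumption) (Nat.lt_add_of_pos_right (by decide))

-- A's outer for loop over the lines, threading in_bc.
def aGo (inbc : Bool) (lines : List String) : List String :=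
  match lines with
  | [] => []
  | l :: rest =>
    let r := aLoop l.toList inbc 0 []
    String.ofList r.1 :: aGo r.2 rest

def strip_block_comments (lines : List String) : List String := aGo false lines

-- ===== PORT B =====
-- termination fact for bLoop's jumps (cited by name in its decreasing_by)
theorem pv_find_step (cs sub : List Char) (cur : Nat) (hcur : cur < cs.length)
    (h : PySem.Chars.findFrom cs sub (cur:Int) none ≠ -1) :
    cs.length - ((PySem.Chars.findFrom cs sub (cur:Int) none).toNat + 2) < cs.length - cur :=
  Nat.sub_lt_sub_left hcur (Nat.lt_of_le_of_lt
    (Int.toNat_natCast cur ▸ Int.toNat_le_toNat ((PySem.Chars.findFrom_natCast_spec cs sub cur (Nat.le_of_lt hcur) h).1))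
    (Nat.lt_add_of_pos_right (by decide)))

-- B's inner while loop: cursor jumps to the next delimiter found by str.find; slices appended.
def bLoop (cs : List Char) (inbc : Bool) (cur : Nat) (pieces : List (List Char)) :
    List (List Char) × Bool :=
  if cur < cs.length then
    if inbc then
      let pos := PySem.Chars.findFrom cs ['*', '/'] (cur : Int) none
      if h : pos = -1 then (pieces, inbc)  -- cur = n; loop exits
      else bLoop cs false (pos.toNat + 2) pieces
    else
      let po := PySem.Chars.findFrom cs ['/', '*'] (cur : Int) none
      let pl := PySem.Chars.findFrom cs ['/', '/'] (cur : Int) none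
      if h2 : po ≠ -1 ∧ (pl = -1 ∨ po < pl) then
        bLoop cs true (po.toNat + 2) (pieces ++ [PySem.List.slice cs (some (cur : Int)) (some po)])
      else if pl ≠ -1 then
        (pieces ++ [PySem.List.slice cs (some (cur : Int)) (some pl)], inbc)  -- cur = n
      else
        (pieces ++ [PySem.List.slice cs (some (cur : Int)) none], inbc)  -- cur = n
  else (pieces, inbc)
termination_by cs.length - cur
decreasing_by
  · exact pv_find_step cs ['*','/'] cur (by assumption) (by assumption)
  · exact pv_find_step cs ['/','*'] cur (by assumption) h2.1

-- B's outer for loop over the lines, threading in_bc; ''.join = flatten.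
def bGo (inbc : Bool) (lines : List String) : List String :=
  match lines with
  | [] => []
  | l :: rest =>
    let r := bLoop l.toList inbc 0 []
    String.ofList r.1.flatten :: bGo r.2 rest

def strip_block_comments_alt (lines : List String) : List String := bGo false lines

-- ===== PRECONDITION & SPEC =====
def Spec_strip_block_comments (lines : List String) (out : List String) : Prop := out = strip_block_comments_alt lines
instance (lines : List String) (out : List String) : Decidable (Spec_strip_block_comments lines out) := by unfold Spec_strip_block_comments; infer_instance

-- ===== CLAIM (what is proved, stated in full; the proofs are below) =====
def Claim_equal_strip_block_comments : Prop := ∀ (lines : List String), Dom_strip_block_comments lines → Spec_strip_block_comments lines (strip_block_comments lines)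

-- ===== LEMMAS AND PROOFS =====

-- A's two-char test at index j is exactly "[a,b] is a prefix of cs.drop j".
theorem cond_iff (cs : List Char) (j : Nat) (a b : Char) :
    ([a, b] <+: cs.drop j) ↔ (j + 1 < cs.length ∧ cs.getD j ' ' = a ∧ cs.getD (j+1) ' ' = b) := by
  by_cases h : j + 1 < cs.length
  · have hd : cs.drop j = cs[j] :: cs[j+1] :: cs.drop (j+2) := by
      rw [List.drop_eq_getElem_cons (by omega), List.drop_eq_getElem_cons (by omega)]
    rw [hd]
    simp only [List.cons_prefix_cons, List.nil_prefix, and_true]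
    simp [h, (by omega : j < cs.length), eq_comm]
  · constructor
    · intro hp
      have := hp.length_le
      simp [List.length_drop] at this
      omega
    · intro hc; exact absurd hc.1 h

-- a prefix of a later suffix is an infix of an earlier suffix
theorem prefix_drop_infix (cs sub : List Char) (cur j : Nat) (hj : cur ≤ j)
    (hp : sub <+: cs.drop j) : sub <:+: cs.drop cur := by
  have h2 : cs.drop j = (cs.drop cur).drop (j - cur) := by
    rw [List.drop_drop]; congr 1; omega
  exact hp.isInfix.trans (h2 ▸ (List.drop_suffix _ _).isInfix)

-- accumulator generalization for aLoop
theorem aLoop_acc (cs : List Char) (inbc : Bool) (i : Nat) (out : List Char) :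
    aLoop cs inbc i out = (out ++ (aLoop cs inbc i []).1, (aLoop cs inbc i []).2) := by
  induction hm : cs.length - i using Nat.strong_induction_on generalizing inbc i out with
  | _ m ih =>
  rw [aLoop.eq_def]
  conv_rhs => rw [aLoop.eq_def]
  split_ifs with h1 h2 h3 h4 h5
  · rw [ih (cs.length - (i+2)) (by omega) false (i+2) out rfl]
  · rw [ih (cs.length - (i+1)) (by omega) true (i+1) out rfl]
  · rw [ih (cs.length - (i+2)) (by omega) true (i+2) out rfl]
  · simp
  · rw [ih (cs.length - (i+1)) (by omega) inbc (i+1) (out ++ [cs.getD i ' ']) rfl,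
        ih (cs.length - (i+1)) (by omega) inbc (i+1) ([] ++ [cs.getD i ' ']) rfl]
    simp
  · simp

-- accumulator generalization for bLoop
theorem bLoop_acc (cs : List Char) (inbc : Bool) (cur : Nat) (pieces : List (List Char)) :
    bLoop cs inbc cur pieces = (pieces ++ (bLoop cs inbc cur []).1, (bLoop cs inbc cur []).2) := by
  induction hm : cs.length - cur using Nat.strong_induction_on generalizing inbc cur pieces with
  | _ m ih =>
  rw [bLoop.eq_def]
  conv_rhs => rw [bLoop.eq_def]
  dsimp only
  split_ifs with h1 h2 h3 h4 h5
  · simp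
  · have hs := PySem.Chars.findFrom_natCast_spec cs ['*','/'] cur (by omega) h3
    rw [ih (cs.length - ((PySem.Chars.findFrom cs ['*','/'] (cur:Int) none).toNat + 2))
        (by omega) false _ pieces rfl]
  · have hs := PySem.Chars.findFrom_natCast_spec cs ['/','*'] cur (by omega) h4.1
    rw [ih (cs.length - ((PySem.Chars.findFrom cs ['/','*'] (cur:Int) none).toNat + 2))
        (by omega) true _ (pieces ++ [PySem.List.slice cs (some (cur:Int)) (some (PySem.Chars.findFrom cs ['/','*'] (cur:Int) none))]) rfl,
       ih (cs.length - ((PySem.Chars.findFrom cs ['/','*'] (cur:Int) none).toNat + 2))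
        (by omega) true _ ([] ++ [PySem.List.slice cs (some (cur:Int)) (some (PySem.Chars.findFrom cs ['/','*'] (cur:Int) none))]) rfl]
    simp
  · simp
  · simp
  · simp

-- in a block comment, A skips char-by-char up to p when no '*/' starts before p
theorem aLoop_skip (cs : List Char) (cur p : Nat) (hcp : cur ≤ p) (hp : p ≤ cs.length)
    (hno : ∀ j, cur ≤ j → j < p → ¬ ([ '*', '/' ] <+: cs.drop j)) :
    aLoop cs true cur [] = aLoop cs true p [] := by
  induction hd : p - cur using Nat.strong_induction_on generalizing cur with
  | _ d ih =>
  rcases Nat.eq_or_lt_of_le hcp with he | hlt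
  · rw [he]
  · have hcur : cur < cs.length := by omega
    have hcond : ¬ (cur + 1 < cs.length ∧ cs.getD cur ' ' = '*' ∧ cs.getD (cur+1) ' ' = '/') := by
      rw [← cond_iff]; exact hno cur le_rfl hlt
    conv_lhs => rw [aLoop.eq_def]
    rw [if_pos hcur, if_pos rfl, if_neg hcond]
    exact ih (p - (cur+1)) (by omega) (cur+1) (by omega)
      (fun j hj hjp => hno j (by omega) hjp) rfl

-- outside a comment, A copies chars one-by-one up to p when no '/*' or '//' starts before p
theorem aLoop_copy (cs : List Char) (cur p : Nat) (hcp : cur ≤ p) (hp : p ≤ cs.length)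
    (hno : ∀ j, cur ≤ j → j < p →
      ¬ ([ '/', '*' ] <+: cs.drop j) ∧ ¬ ([ '/', '/' ] <+: cs.drop j)) :
    aLoop cs false cur [] =
      ((cs.drop cur).take (p - cur) ++ (aLoop cs false p []).1, (aLoop cs false p []).2) := by
  induction hd : p - cur using Nat.strong_induction_on generalizing cur with
  | _ d ih =>
  rcases Nat.eq_or_lt_of_le hcp with he | hlt
  · have hd0 : d = 0 := by omega
    subst hd0
    rw [he]; simp
  · have hcur : cur < cs.length := by omega
    have hc1 : ¬ (cur + 1 < cs.length ∧ cs.getD cur ' ' = '/' ∧ cs.getD (cur+1) ' ' = '*') := by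
      rw [← cond_iff]; exact (hno cur le_rfl hlt).1
    have hc2 : ¬ (cur + 1 < cs.length ∧ cs.getD cur ' ' = '/' ∧ cs.getD (cur+1) ' ' = '/') := by
      rw [← cond_iff]; exact (hno cur le_rfl hlt).2
    conv_lhs => rw [aLoop.eq_def]
    rw [if_pos hcur, if_neg (by simp : ¬ (false = true)), if_neg hc1, if_neg hc2]
    rw [aLoop_acc cs false (cur+1)]
    rw [ih (p - (cur+1)) (by omega) (cur+1) (by omega)
      (fun j hj hjp => hno j (by omega) hjp) rfl]
    have hdrop : cs.drop cur = cs.getD cur ' ' :: cs.drop (cur+1) := by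
      rw [List.drop_eq_getElem_cons hcur, List.getD_eq_getElem]
    rw [hdrop, (by omega : d = (p - (cur+1)) + 1), List.take_succ_cons]
    simp

-- per-line core equivalence
theorem loop_eq (cs : List Char) (inbc : Bool) (cur : Nat) :
    aLoop cs inbc cur [] = ((bLoop cs inbc cur []).1.flatten, (bLoop cs inbc cur []).2) := by
  induction hm : cs.length - cur using Nat.strong_induction_on generalizing inbc cur with
  | _ m ih =>
  by_cases hcur : cur < cs.length
  case neg =>
    rw [aLoop.eq_def, bLoop.eq_def, if_neg hcur, if_neg hcur]; simp
  case pos =>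
  conv_rhs => rw [bLoop.eq_def]
  rw [if_pos hcur]
  cases inbc with
  | true =>
    dsimp only
    by_cases hpos : PySem.Chars.findFrom cs ['*','/'] (cur:Int) none = -1
    · rw [dif_pos hpos]
      have hno : ∀ j, cur ≤ j → j < cs.length → ¬ (['*','/'] <+: cs.drop j) := by
        intro j hj _ hpre
        exact ((PySem.Chars.findFrom_natCast_eq_neg_one_iff cs ['*','/'] cur (by omega)).1 hpos)
          (prefix_drop_infix cs _ cur j hj hpre)
      rw [aLoop_skip cs cur cs.length (by omega) le_rfl hno]
      rw [aLoop.eq_def, if_neg (by omega : ¬ cs.length < cs.length)]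
      simp
    · rw [dif_neg hpos]
      have hs := PySem.Chars.findFrom_natCast_spec cs ['*','/'] cur (by omega) hpos
      have hge : (cur : Int) ≤ PySem.Chars.findFrom cs ['*','/'] (cur:Int) none := hs.1
      have hq : PySem.Chars.findFrom cs ['*','/'] (cur:Int) none =
          (((PySem.Chars.findFrom cs ['*','/'] (cur:Int) none).toNat : Nat) : Int) := by omega
      have hql : (PySem.Chars.findFrom cs ['*','/'] (cur:Int) none).toNat + 1 < cs.length := by
        have := hs.2.1.length_le
        simp [List.length_drop] at this
        omega
      have hcond := (cond_iff cs (PySem.Chars.findFrom cs ['*','/'] (cur:Int) none).toNat '*' '/').1 hs.2.1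
      rw [aLoop_skip cs cur (PySem.Chars.findFrom cs ['*','/'] (cur:Int) none).toNat (by omega) (by omega)
        (fun j hj hjq => hs.2.2 j (by omega) hjq)]
      conv_lhs => rw [aLoop.eq_def]
      rw [if_pos (by omega : (PySem.Chars.findFrom cs ['*','/'] (cur:Int) none).toNat < cs.length),
        if_pos rfl, if_pos hcond]
      exact ih (cs.length - ((PySem.Chars.findFrom cs ['*','/'] (cur:Int) none).toNat+2)) (by omega)
        false _ rfl
  | false =>
    dsimp only
    rw [if_neg (by simp : ¬ (false = true))]
    by_cases hc : PySem.Chars.findFrom cs ['/','*'] (cur:Int) none ≠ -1 ∧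
        (PySem.Chars.findFrom cs ['/','/'] (cur:Int) none = -1 ∨
         PySem.Chars.findFrom cs ['/','*'] (cur:Int) none < PySem.Chars.findFrom cs ['/','/'] (cur:Int) none)
    · rw [dif_pos hc]
      have hso := PySem.Chars.findFrom_natCast_spec cs ['/','*'] cur (by omega) hc.1
      have hql : (PySem.Chars.findFrom cs ['/','*'] (cur:Int) none).toNat + 1 < cs.length := by
        have := hso.2.1.length_le
        simp [List.length_drop] at this
        omega
      have hnol : ∀ j, cur ≤ j → j < (PySem.Chars.findFrom cs ['/','*'] (cur:Int) none).toNat →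
          ¬ (['/','/'] <+: cs.drop j) := by
        rcases hc.2 with hl | hl
        · intro j hj _ hpre
          exact ((PySem.Chars.findFrom_natCast_eq_neg_one_iff cs ['/','/'] cur (by omega)).1 hl)
            (prefix_drop_infix cs _ cur j hj hpre)
        · intro j hj hjq
          have hne : PySem.Chars.findFrom cs ['/','/'] (cur:Int) none ≠ -1 := by
            intro h0; rw [h0] at hl; omega
          have hsl := PySem.Chars.findFrom_natCast_spec cs ['/','/'] cur (by omega) hne
          exact hsl.2.2 j (by omega) (by omega)
      rw [aLoop_copy cs cur (PySem.Chars.findFrom cs ['/','*'] (cur:Int) none).toNat (by omega) (by omega)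
        (fun j hj hjq => ⟨hso.2.2 j (by omega) hjq, hnol j hj hjq⟩)]
      conv_lhs => rw [aLoop.eq_def]
      have hcond := (cond_iff cs (PySem.Chars.findFrom cs ['/','*'] (cur:Int) none).toNat '/' '*').1 hso.2.1
      rw [if_pos (by omega : (PySem.Chars.findFrom cs ['/','*'] (cur:Int) none).toNat < cs.length),
        if_neg (by simp : ¬ (false = true)), if_pos hcond]
      rw [ih (cs.length - ((PySem.Chars.findFrom cs ['/','*'] (cur:Int) none).toNat+2)) (by omega)
        true _ rfl]
      simp only [List.nil_append]
      rw [bLoop_acc cs true ((PySem.Chars.findFrom cs ['/','*'] (cur:Int) none).toNat+2)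
        [PySem.List.slice cs (some (cur:Int)) (some (PySem.Chars.findFrom cs ['/','*'] (cur:Int) none))]]
      have hslice : PySem.List.slice cs (some (cur:Int)) (some (PySem.Chars.findFrom cs ['/','*'] (cur:Int) none)) =
          (cs.drop cur).take ((PySem.Chars.findFrom cs ['/','*'] (cur:Int) none).toNat - cur) := by
        rw [(by omega : PySem.Chars.findFrom cs ['/','*'] (cur:Int) none =
          (((PySem.Chars.findFrom cs ['/','*'] (cur:Int) none).toNat : Nat) : Int)),
          PySem.List.slice_natCast]
        simp
        omega
      rw [hslice]
      simp
    · rw [dif_neg hc]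
      by_cases hl : PySem.Chars.findFrom cs ['/','/'] (cur:Int) none ≠ -1
      · rw [if_pos hl]
        have hsl := PySem.Chars.findFrom_natCast_spec cs ['/','/'] cur (by omega) hl
        have hql : (PySem.Chars.findFrom cs ['/','/'] (cur:Int) none).toNat + 1 < cs.length := by
          have := hsl.2.1.length_le
          simp [List.length_drop] at this
          omega
        have hcond := (cond_iff cs (PySem.Chars.findFrom cs ['/','/'] (cur:Int) none).toNat '/' '/').1 hsl.2.1
        have hnoo : ∀ j, cur ≤ j → j < (PySem.Chars.findFrom cs ['/','/'] (cur:Int) none).toNat →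
            ¬ (['/','*'] <+: cs.drop j) := by
          intro j hj hjq
          by_cases hpo : PySem.Chars.findFrom cs ['/','*'] (cur:Int) none = -1
          · intro hpre
            exact ((PySem.Chars.findFrom_natCast_eq_neg_one_iff cs ['/','*'] cur (by omega)).1 hpo)
              (prefix_drop_infix cs _ cur j hj hpre)
          · have hs2 := PySem.Chars.findFrom_natCast_spec cs ['/','*'] cur (by omega) hpo
            have hple : PySem.Chars.findFrom cs ['/','/'] (cur:Int) none ≤
                PySem.Chars.findFrom cs ['/','*'] (cur:Int) none := by
              rcases not_and_or.1 hc with h | h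
              · exact (hpo (not_not.mp h)).elim
              · rcases not_or.1 h with ⟨_, h2⟩
                omega
            exact hs2.2.2 j (by omega) (by omega)
        rw [aLoop_copy cs cur (PySem.Chars.findFrom cs ['/','/'] (cur:Int) none).toNat (by omega) (by omega)
          (fun j hj hjq => ⟨hnoo j hj hjq, hsl.2.2 j (by omega) hjq⟩)]
        conv_lhs => rw [aLoop.eq_def]
        have hc1 : ¬ ((PySem.Chars.findFrom cs ['/','/'] (cur:Int) none).toNat + 1 < cs.length ∧
            cs.getD (PySem.Chars.findFrom cs ['/','/'] (cur:Int) none).toNat ' ' = '/' ∧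
            cs.getD ((PySem.Chars.findFrom cs ['/','/'] (cur:Int) none).toNat + 1) ' ' = '*') := by
          intro hx
          have h1 := hx.2.2
          rw [hcond.2.2] at h1
          exact absurd h1 (by decide)
        rw [if_pos (by omega : (PySem.Chars.findFrom cs ['/','/'] (cur:Int) none).toNat < cs.length),
          if_neg (by simp : ¬ (false = true)), if_neg hc1, if_pos hcond]
        have hslice : PySem.List.slice cs (some (cur:Int)) (some (PySem.Chars.findFrom cs ['/','/'] (cur:Int) none)) =
            (cs.drop cur).take ((PySem.Chars.findFrom cs ['/','/'] (cur:Int) none).toNat - cur) := by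
          rw [(by omega : PySem.Chars.findFrom cs ['/','/'] (cur:Int) none =
            (((PySem.Chars.findFrom cs ['/','/'] (cur:Int) none).toNat : Nat) : Int)),
            PySem.List.slice_natCast]
          simp
          omega
        rw [hslice]
        simp
      · rw [if_neg hl]
        have hpl : PySem.Chars.findFrom cs ['/','/'] (cur:Int) none = -1 := not_not.mp hl
        have hpo : PySem.Chars.findFrom cs ['/','*'] (cur:Int) none = -1 := by
          rcases not_and_or.1 hc with h | h
          · exact not_not.mp h
          · exact (h (Or.inl hpl)).elim
        have hno : ∀ j, cur ≤ j → j < cs.length →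
            ¬ (['/','*'] <+: cs.drop j) ∧ ¬ (['/','/'] <+: cs.drop j) := by
          intro j hj _
          constructor
          · intro hpre
            exact ((PySem.Chars.findFrom_natCast_eq_neg_one_iff cs ['/','*'] cur (by omega)).1 hpo)
              (prefix_drop_infix cs _ cur j hj hpre)
          · intro hpre
            exact ((PySem.Chars.findFrom_natCast_eq_neg_one_iff cs ['/','/'] cur (by omega)).1 hpl)
              (prefix_drop_infix cs _ cur j hj hpre)
        rw [aLoop_copy cs cur cs.length (by omega) le_rfl hno]
        conv_lhs => rw [aLoop.eq_def]
        rw [if_neg (by omega : ¬ cs.length < cs.length)]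
        rw [PySem.List.slice_from_natCast]
        simp [List.take_of_length_le]

theorem go_eq (inbc : Bool) (lines : List String) : aGo inbc lines = bGo inbc lines := by
  induction lines generalizing inbc with
  | nil => rfl
  | cons l rest ih =>
    simp only [aGo, bGo, loop_eq l.toList inbc 0]
    exact congrArg₂ _ rfl (ih _)

-- ===== VERDICT (by name: the statement is the Claim_ definition above) =====
theorem strip_block_comments_spec : Claim_equal_strip_block_comments := by
  intro lines _
  show strip_block_comments lines = strip_block_comments_alt lines
  exact go_eq false lines
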